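-- pv_equiv track=rewrite | github.com/erikseulean/python-algo | Problems/shortest_subarray_containing_words_in_given_order.py | find_occurence
-- ===== SOURCE A (Python) =====
-- def find_occurence(words, text):
--     indexes = { words[i]:i for i in range(len(words))}
--     last_location = {}
--     dp = [-1 for _ in range(len(text))]
--     min_value, mstart, mend = len(text), 0, 0
--     for i in range(len(text)):
--         if text[i] in indexes:
--             last_location[indexes[text[i]]] = i
--             if indexes[text[i]] == 0:
--                 dp[i] = 0
--             elif indexes[text[i]] - 1 in last_location and dp[last_location[indexes[text[i]] - 1]] != -1:
--                 dp[i] = dp[last_location[indexes[text[i]] - 1]] + i - last_location[indexes[text[i]] - 1]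
--             else:
--                 dp[i] = -1
--             if indexes[text[i]] == len(indexes) - 1:
--                 if dp[i] < min_value and dp[i] != -1:
--                     min_value = dp[i]
--                     mstart, mend = i - dp[i], i + 1
--
--     return text[mstart:mend + 1]
-- ===== SOURCE B (Python) =====
-- def _find_back(rank, text, target, j):
--     # nearest index <= j whose word has rank == target, or None
--     while j >= 0 and rank.get(text[j]) != target:
--         j -= 1
--     return j if j >= 0 else None
--
--
-- def _chase(rank, text, target, j):
--     # from position j, repeatedly jump to the nearest earlier position of the
--     # next-lower rank, down to rank 0; returns the chain's start, or None
--     while target >= 0: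
--         j = _find_back(rank, text, target, j - 1)
--         if j is None:
--             return None
--         target -= 1
--     return j
--
--
-- def find_occurence(words, text):
--     # No dp array: for each occurrence of the last-rank word, greedily chase the
--     # chain of nearest earlier occurrences of the previous ranks backwards.
--     rank = {w: r for r, w in enumerate(words)}
--     m = len(rank)
--     min_value, mstart, mend = len(text), 0, 0
--     for i, w in enumerate(text):
--         if rank.get(w) != m - 1:
--             continue
--         s = _chase(rank, text, m - 2, i)
--         if s is not None and i - s < min_value:
--             min_value, mstart, mend = i - s, s, i + 1
--     return text[mstart:mend + 1]
-- ===== Notes on version B (the rewrite author's own statement) =====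
-- stated objective: alternative
-- what changed: Replaces A's forward dynamic program (per-position dp array plus last_location dict) by a backward greedy chase: for each occurrence of the last-rank word it walks backwards through text, repeatedly jumping to the nearest earlier occurrence of the next-lower rank, with no dp array and no per-rank state.
import Mathlib
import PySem

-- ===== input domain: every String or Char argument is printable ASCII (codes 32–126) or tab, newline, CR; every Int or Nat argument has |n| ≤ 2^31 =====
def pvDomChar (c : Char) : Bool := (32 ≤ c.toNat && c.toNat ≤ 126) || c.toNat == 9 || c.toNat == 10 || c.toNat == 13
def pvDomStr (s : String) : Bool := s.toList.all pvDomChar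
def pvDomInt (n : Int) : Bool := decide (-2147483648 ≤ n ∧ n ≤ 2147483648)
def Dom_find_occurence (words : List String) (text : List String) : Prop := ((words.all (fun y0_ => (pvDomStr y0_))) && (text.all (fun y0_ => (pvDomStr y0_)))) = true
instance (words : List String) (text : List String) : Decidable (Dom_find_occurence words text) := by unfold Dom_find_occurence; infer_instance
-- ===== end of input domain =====

-- B drops A's dp array and last_location dict: for each occurrence of the last-rank word it
-- chases the chain of nearest earlier occurrences of the previous ranks backwards (alternative algorithm, not faster).

-- ===== PORT A =====
-- A's dp value for position i of a word of rank r (the if/elif/else chain on dp[i]);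
-- 'r - 1 in last_location' is the contains test, the repeated 'last_location[r - 1]' reads are repeated getD
def dpiA (ll : PySem.Dict Int Int) (dp : List Int) (r i : Int) : Int :=
  if r = 0 then 0
  else if ll.contains (r - 1) = true ∧ PySem.List.pyGetD dp (ll.getD (r - 1) 0) 0 ≠ -1 then
    PySem.List.pyGetD dp (ll.getD (r - 1) 0) 0 + i - ll.getD (r - 1) 0
  else -1

-- body of A's loop when 'text[i] in indexes' holds, r = indexes[text[i]]
def stepAhit (idx : PySem.Dict String Int)
    (st : PySem.Dict Int Int × List Int × Int × Int × Int) (i r : Int) :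
    PySem.Dict Int Int × List Int × Int × Int × Int :=
  (st.1.insert r i,
   PySem.List.pySetD st.2.1 i (dpiA (st.1.insert r i) st.2.1 r i),
   if r = (idx.size : Int) - 1 ∧ dpiA (st.1.insert r i) st.2.1 r i < st.2.2.1 ∧
        dpiA (st.1.insert r i) st.2.1 r i ≠ -1 then
     (dpiA (st.1.insert r i) st.2.1 r i, i - dpiA (st.1.insert r i) st.2.1 r i, i + 1)
   else (st.2.2.1, st.2.2.2.1, st.2.2.2.2))

def stepA (idx : PySem.Dict String Int) (text : List String)
    (st : PySem.Dict Int Int × List Int × Int × Int × Int) (i : Int) :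
    PySem.Dict Int Int × List Int × Int × Int × Int :=
  if idx.contains (PySem.List.pyGetD text i "") = true then
    stepAhit idx st i (idx.getD (PySem.List.pyGetD text i "") 0)
  else st

def find_occurence (words : List String) (text : List String) : List String :=
  let indexes : PySem.Dict String Int :=
    (PySem.List.pyRange 0 (words.length : Int) 1).foldl
      (fun d i => d.insert (PySem.List.pyGetD words i "") i) PySem.Dict.empty
  let st :=
    (PySem.List.pyRange 0 (text.length : Int) 1).foldl (stepA indexes text)
      (PySem.Dict.empty, List.replicate text.length (-1 : Int), (text.length : Int), 0, 0)
  PySem.List.slice text (some st.2.2.2.1) (some (st.2.2.2.2 + 1))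

-- ===== PORT B =====
-- B's '_find_back' while loop: nearest index ≤ j whose word has rank target (none = None)
def findBack (rank : PySem.Dict String Int) (text : List String) (target : Int) (j : Int) :
    Option Int :=
  if _h : j < 0 then none
  else if rank.get? (PySem.List.pyGetD text j "") = some target then some j
  else findBack rank text target (j - 1)
termination_by (j + 1).toNat
decreasing_by omega

-- B's '_chase' while loop over target = m-2 … 0
def chase (rank : PySem.Dict String Int) (text : List String) (target : Int) (j : Int) :
    Option Int :=
  if _h : target < 0 then some j
  else
    match findBack rank text target (j - 1) with
    | none => none
    | some j' => chase rank text (target - 1) j'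
termination_by (target + 1).toNat
decreasing_by omega

-- body of B's loop for one (i, w) of enumerate(text)
def stepB (rank : PySem.Dict String Int) (text : List String) (m : Int)
    (st : Int × Int × Int) (p : Int × String) : Int × Int × Int :=
  if rank.get? p.2 = some (m - 1) then
    match chase rank text (m - 2) p.1 with
    | none => st
    | some s => if p.1 - s < st.1 then (p.1 - s, s, p.1 + 1) else st
  else st

def find_occurence_alt (words : List String) (text : List String) : List String :=
  let rank : PySem.Dict String Int :=
    (PySem.List.enumerate words 0).foldl (fun d p => d.insert p.2 p.1) PySem.Dict.empty
  let st :=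
    (PySem.List.enumerate text 0).foldl (stepB rank text (rank.size : Int))
      ((text.length : Int), 0, 0)
  PySem.List.slice text (some st.2.1) (some (st.2.2 + 1))

-- ===== PRECONDITION & SPEC =====
def Spec_find_occurence (words : List String) (text : List String) (out : List String) : Prop := out = find_occurence_alt words text
instance (words : List String) (text : List String) (out : List String) : Decidable (Spec_find_occurence words text out) := by unfold Spec_find_occurence; infer_instance

-- ===== CLAIM (what is proved, stated in full; the proofs are below) =====
def Claim_equal_find_occurence : Prop := ∀ (words : List String) (text : List String), Dom_find_occurence words text → Spec_find_occurence words text (find_occurence words text)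

-- ===== LEMMAS AND PROOFS =====

-- B's value of the chain ending at a hit position j of rank r, written as A's dp encodes it
def dval (rank : PySem.Dict String Int) (text : List String) (r j : Int) : Int :=
  match chase rank text (r - 1) j with
  | none => -1
  | some s => j - s

lemma findBack_neg (rank : PySem.Dict String Int) (text : List String) (t : Int) {j : Int}
    (h : j < 0) : findBack rank text t j = none := by
  rw [findBack]; simp [h]

lemma findBack_step (rank : PySem.Dict String Int) (text : List String) (t : Int) {j : Int}
    (h : 0 ≤ j) :
    findBack rank text t j =
      if rank.get? (PySem.List.pyGetD text j "") = some t then some j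
      else findBack rank text t (j - 1) := by
  rw [findBack]; simp [show ¬ j < 0 by omega]

lemma findBack_spec (rank : PySem.Dict String Int) (text : List String) (t : Int) :
    ∀ (n : Nat) (j j' : Int), (j + 1).toNat ≤ n → findBack rank text t j = some j' →
      0 ≤ j' ∧ j' ≤ j ∧ rank.get? (PySem.List.pyGetD text j' "") = some t := by
  intro n
  induction n with
  | zero =>
    intro j j' hn hf
    rw [findBack_neg rank text t (by omega)] at hf
    exact absurd hf (by simp)
  | succ n ih =>
    intro j j' hn hf
    by_cases hj : j < 0
    · rw [findBack_neg rank text t hj] at hf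
      exact absurd hf (by simp)
    · rw [findBack_step rank text t (by omega)] at hf
      by_cases hr : rank.get? (PySem.List.pyGetD text j "") = some t
      · rw [if_pos hr] at hf
        obtain rfl : j = j' := by simpa using hf
        exact ⟨by omega, le_refl _, hr⟩
      · rw [if_neg hr] at hf
        obtain ⟨h1, h2, h3⟩ := ih (j - 1) j' (by omega) hf
        exact ⟨h1, by omega, h3⟩

lemma chase_neg (rank : PySem.Dict String Int) (text : List String) {t : Int} (j : Int)
    (h : t < 0) : chase rank text t j = some j := by
  rw [chase]; simp [h]

lemma chase_step (rank : PySem.Dict String Int) (text : List String) {t : Int} (j : Int)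
    (h : 0 ≤ t) :
    chase rank text t j =
      match findBack rank text t (j - 1) with
      | none => none
      | some j' => chase rank text (t - 1) j' := by
  rw [chase]; simp [show ¬ t < 0 by omega]

lemma chase_step_none (rank : PySem.Dict String Int) (text : List String) {t : Int} (j : Int)
    (h : 0 ≤ t) (hf : findBack rank text t (j - 1) = none) :
    chase rank text t j = none := by
  rw [chase_step rank text j h, hf]

lemma chase_step_some (rank : PySem.Dict String Int) (text : List String) {t : Int} (j j' : Int)
    (h : 0 ≤ t) (hf : findBack rank text t (j - 1) = some j') :
    chase rank text t j = chase rank text (t - 1) j' := by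
  rw [chase_step rank text j h, hf]

lemma chase_bound (rank : PySem.Dict String Int) (text : List String) :
    ∀ (n : Nat) (t j s : Int), (t + 1).toNat ≤ n → 0 ≤ j → chase rank text t j = some s →
      0 ≤ s ∧ s ≤ j := by
  intro n
  induction n with
  | zero =>
    intro t j s hn hj hc
    rw [chase_neg rank text j (by omega)] at hc
    obtain rfl : j = s := by simpa using hc
    exact ⟨hj, le_refl _⟩
  | succ n ih =>
    intro t j s hn hj hc
    by_cases ht : t < 0
    · rw [chase_neg rank text j ht] at hc
      obtain rfl : j = s := by simpa using hc
      exact ⟨hj, le_refl _⟩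
    · rw [chase_step rank text j (by omega)] at hc
      cases hf : findBack rank text t (j - 1) with
      | none => rw [hf] at hc; exact absurd hc (by simp)
      | some j' =>
        rw [hf] at hc
        obtain ⟨h1, h2, _⟩ := findBack_spec rank text t (j + 1).toNat (j - 1) j' (by omega) hf
        obtain ⟨h3, h4⟩ := ih (t - 1) j' s (by omega) h1 hc
        exact ⟨h3, by omega⟩

lemma dval_none (rank : PySem.Dict String Int) (text : List String) (r j : Int)
    (h : chase rank text (r - 1) j = none) : dval rank text r j = -1 := by
  unfold dval; rw [h]

lemma dval_some (rank : PySem.Dict String Int) (text : List String) (r j s : Int)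
    (h : chase rank text (r - 1) j = some s) : dval rank text r j = j - s := by
  unfold dval; rw [h]

-- the dict built by inserting ranks only holds nonnegative values
lemma foldl_insert_values_nonneg (f : Int → String) :
    ∀ (l : List Int) (d : PySem.Dict String Int), (∀ i ∈ l, 0 ≤ i) →
      (∀ w r, d.get? w = some r → 0 ≤ r) →
      ∀ w r, (l.foldl (fun d i => d.insert (f i) i) d).get? w = some r → 0 ≤ r := by
  intro l
  induction l with
  | nil => intro d _ hd; exact hd
  | cons x xs ih =>
    intro d hl hd
    refine ih (d.insert (f x) x) (fun i hi => hl i (List.mem_cons_of_mem _ hi)) ?_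
    intro w r hw
    rw [PySem.Dict.get?_insert] at hw
    by_cases hwx : w = f x
    · rw [if_pos hwx] at hw
      obtain rfl : x = r := by simpa using hw
      exact hl x (List.mem_cons_self)
    · rw [if_neg hwx] at hw
      exact hd w r hw

lemma pyGetD_set_ne (dp : List Int) (i j v : Int) (hi : 0 ≤ i) (hj : 0 ≤ j) (hne : j ≠ i) :
    PySem.List.pyGetD (PySem.List.pySetD dp i v) j 0 = PySem.List.pyGetD dp j 0 := by
  rw [PySem.List.pySetD_of_nonneg _ _ hi]
  rw [show j = ((j.toNat : Int)) by omega, PySem.List.pyGetD_natCast, PySem.List.pyGetD_natCast]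
  rw [List.getD_eq_getElem?_getD, List.getD_eq_getElem?_getD,
    List.getElem?_set_ne (by omega)]

lemma pyGetD_set_self (dp : List Int) (i v : Int) (hi : 0 ≤ i) (hlen : i < dp.length) :
    PySem.List.pyGetD (PySem.List.pySetD dp i v) i 0 = v := by
  rw [PySem.List.pySetD_of_nonneg _ _ hi]
  rw [show i = ((i.toNat : Int)) by omega, PySem.List.pyGetD_natCast]
  simp only [Int.toNat_natCast, List.getD_eq_getElem?_getD]
  rw [List.getElem?_set_self (by omega)]
  rfl

-- coupling of A's state with B's (min, mstart, mend) triple after i0 processed positions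
def relAB (idx : PySem.Dict String Int) (text : List String) (i0 : Int)
    (a : PySem.Dict Int Int × List Int × Int × Int × Int) (b : Int × Int × Int) : Prop :=
  a.2.1.length = text.length ∧ a.2.2 = b ∧
  (∀ t, a.1.get? t = findBack idx text t (i0 - 1)) ∧
  (∀ j r, 0 ≤ j → j < i0 → idx.get? (PySem.List.pyGetD text j "") = some r →
    PySem.List.pyGetD a.2.1 j 0 = dval idx text r j)

-- A's dp value at a fresh hit equals B's backward-chase value
lemma dpi_eq (idx : PySem.Dict String Int) (text : List String)
    (ll : PySem.Dict Int Int) (dp : List Int) (i0 r : Int) (hr0 : 0 ≤ r) (hi0 : 0 ≤ i0)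
    (hll : ∀ t, ll.get? t = findBack idx text t (i0 - 1))
    (hdp : ∀ j r', 0 ≤ j → j < i0 → idx.get? (PySem.List.pyGetD text j "") = some r' →
      PySem.List.pyGetD dp j 0 = dval idx text r' j) :
    dpiA (ll.insert r i0) dp r i0 = dval idx text r i0 := by
  by_cases hr : r = 0
  · rw [dval_some idx text r i0 i0 (by rw [hr]; exact chase_neg idx text i0 (by omega))]
    unfold dpiA
    rw [if_pos hr]
    omega
  · cases hf : findBack idx text (r - 1) (i0 - 1) with
    | none =>
      rw [dval_none idx text r i0 (chase_step_none idx text i0 (by omega) hf)]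
      unfold dpiA
      rw [if_neg hr,
        if_neg (by
          intro h
          have hc := h.1
          rw [PySem.Dict.contains_eq_isSome_get?,
            PySem.Dict.get?_insert_of_ne _ _ (by omega : r - 1 ≠ r), hll, hf] at hc
          simp at hc)]
    | some j' =>
      obtain ⟨hj0, hji, hjr⟩ :=
        findBack_spec idx text (r - 1) (i0 + 1).toNat (i0 - 1) j' (by omega) hf
      have hch : chase idx text (r - 1) i0 = chase idx text (r - 1 - 1) j' :=
        chase_step_some idx text i0 j' (by omega) hf
      have hgj : (ll.insert r i0).getD (r - 1) 0 = j' := by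
        rw [PySem.Dict.getD_eq_get?_getD,
          PySem.Dict.get?_insert_of_ne _ _ (by omega : r - 1 ≠ r), hll, hf]
        rfl
      have hct : (ll.insert r i0).contains (r - 1) = true := by
        rw [PySem.Dict.contains_eq_isSome_get?,
          PySem.Dict.get?_insert_of_ne _ _ (by omega : r - 1 ≠ r), hll, hf]
        rfl
      have hdpj : PySem.List.pyGetD dp j' 0 = dval idx text (r - 1) j' :=
        hdp j' (r - 1) hj0 (by omega) hjr
      unfold dpiA
      rw [if_neg hr, hgj, hdpj]
      cases hc : chase idx text (r - 1 - 1) j' with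
      | none =>
        rw [dval_none idx text (r - 1) j' hc,
            dval_none idx text r i0 (by rw [hch]; exact hc),
            if_neg (by simp)]
      | some s =>
        obtain ⟨hs0, hsj⟩ := chase_bound idx text (r + 1).toNat (r - 1 - 1) j' s (by omega) hj0 hc
        rw [dval_some idx text (r - 1) j' s hc,
            dval_some idx text r i0 s (by rw [hch]; exact hc),
            if_pos ⟨hct, by omega⟩]
        omega

lemma step_rel (idx : PySem.Dict String Int) (text : List String) (i0 : Int)
    (a : PySem.Dict Int Int × List Int × Int × Int × Int) (b : Int × Int × Int)
    (hvals : ∀ w r, idx.get? w = some r → 0 ≤ r)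
    (h0 : 0 ≤ i0) (hn : i0 < (text.length : Int)) (hrel : relAB idx text i0 a b) :
    relAB idx text (i0 + 1) (stepA idx text a i0)
      (stepB idx text (idx.size : Int) b (i0, PySem.List.pyGetD text i0 "")) := by
  obtain ⟨hlen, hmin, hll, hdp⟩ := hrel
  unfold stepA
  cases hg : idx.get? (PySem.List.pyGetD text i0 "") with
  | none =>
    have hB : stepB idx text (idx.size : Int) b (i0, PySem.List.pyGetD text i0 "") = b := by
      unfold stepB
      rw [if_neg (by simp [hg])]
    rw [if_neg (by rw [PySem.Dict.contains_eq_isSome_get?, hg]; simp), hB]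
    refine ⟨hlen, hmin, ?_, ?_⟩
    · intro t
      rw [show i0 + 1 - 1 = i0 by omega, findBack_step idx text t h0,
          if_neg (by rw [hg]; simp), hll]
    · intro j r hj0 hji hjr
      rcases (by omega : j < i0 ∨ j = i0) with h | h
      · exact hdp j r hj0 h hjr
      · rw [h, hg] at hjr
        exact absurd hjr (by simp)
  | some r =>
    have hr0 : 0 ≤ r := hvals _ _ hg
    rw [if_pos (by rw [PySem.Dict.contains_eq_isSome_get?, hg]; rfl),
        show idx.getD (PySem.List.pyGetD text i0 "") 0 = r by
          rw [PySem.Dict.getD_eq_get?_getD, hg]; rfl]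
    unfold stepAhit
    set d : Int := dpiA (a.1.insert r i0) a.2.1 r i0 with hd_def
    have hd : d = dval idx text r i0 := dpi_eq idx text a.1 a.2.1 i0 r hr0 h0 hll hdp
    have hll' : ∀ t, (a.1.insert r i0).get? t = findBack idx text t (i0 + 1 - 1) := by
      intro t
      rw [show i0 + 1 - 1 = i0 by omega, findBack_step idx text t h0]
      by_cases htr : t = r
      · rw [htr, if_pos (by rw [hg]), PySem.Dict.get?_insert_self]
      · rw [if_neg (by rw [hg]; simp; omega), PySem.Dict.get?_insert_of_ne _ _ htr, hll]
    have hdp' : ∀ j r', 0 ≤ j → j < i0 + 1 →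
        idx.get? (PySem.List.pyGetD text j "") = some r' →
        PySem.List.pyGetD (PySem.List.pySetD a.2.1 i0 d) j 0 = dval idx text r' j := by
      intro j r' hj0 hji hjr
      rcases (by omega : j < i0 ∨ j = i0) with h | h
      · rw [pyGetD_set_ne a.2.1 i0 j d h0 hj0 (by omega)]
        exact hdp j r' hj0 h hjr
      · subst h
        rw [pyGetD_set_self a.2.1 j d (by omega) (by omega)]
        obtain rfl : r' = r := by rw [hg] at hjr; simpa using hjr.symm
        exact hd
    have hlen' : (PySem.List.pySetD a.2.1 i0 d).length = text.length := by
      rw [PySem.List.pySetD_of_nonneg _ _ h0, List.length_set]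
      exact hlen
    by_cases hm : r = (idx.size : Int) - 1
    · have hm2 : (idx.size : Int) - 2 = r - 1 := by omega
      cases hch : chase idx text (r - 1) i0 with
      | none =>
        have hdneg : d = -1 := by rw [hd, dval_none idx text r i0 hch]
        have hB : stepB idx text (idx.size : Int) b (i0, PySem.List.pyGetD text i0 "") = b := by
          unfold stepB
          rw [if_pos (by rw [hg, hm])]
          have hsc : chase idx text ((idx.size : Int) - 2)
              ((i0, PySem.List.pyGetD text i0 "") : Int × String).1 = none := by
            rw [hm2]; exact hch
          rw [hsc]
        rw [if_neg (by intro h; exact absurd hdneg (by simpa using h.2.2)), hB]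
        exact ⟨hlen', hmin, hll', hdp'⟩
      | some s =>
        obtain ⟨hs0, hsi⟩ := chase_bound idx text (r + 1).toNat (r - 1) i0 s (by omega) h0 hch
        have hds : d = i0 - s := by rw [hd, dval_some idx text r i0 s hch]
        have hb1 : a.2.2.1 = b.1 := by rw [← hmin]
        have hB : stepB idx text (idx.size : Int) b (i0, PySem.List.pyGetD text i0 "") =
            if i0 - s < b.1 then (i0 - s, s, i0 + 1) else b := by
          unfold stepB
          rw [if_pos (by rw [hg, hm])]
          have hsc : chase idx text ((idx.size : Int) - 2)
              ((i0, PySem.List.pyGetD text i0 "") : Int × String).1 = some s := by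
            rw [hm2]; exact hch
          rw [hsc]
        rw [hB]
        by_cases hlt : i0 - s < b.1
        · rw [if_pos ⟨hm, by omega, by omega⟩, if_pos hlt]
          refine ⟨hlen', ?_, hll', hdp'⟩
          show (d, i0 - d, i0 + 1) = (i0 - s, s, i0 + 1)
          rw [hds, show i0 - (i0 - s) = s by omega]
        · rw [if_neg (by intro h; exact absurd h.2.1 (by omega)), if_neg hlt]
          refine ⟨hlen', ?_, hll', hdp'⟩
          show (a.2.2.1, a.2.2.2.1, a.2.2.2.2) = b
          rw [← hmin]
    · have hB : stepB idx text (idx.size : Int) b (i0, PySem.List.pyGetD text i0 "") = b := by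
        unfold stepB
        rw [if_neg (by rw [hg]; simp; omega)]
      rw [if_neg (fun h => hm h.1), hB]
      refine ⟨hlen', ?_, hll', hdp'⟩
      show (a.2.2.1, a.2.2.2.1, a.2.2.2.2) = b
      rw [← hmin]

lemma loop_rel (idx : PySem.Dict String Int) (text : List String)
    (hvals : ∀ w r, idx.get? w = some r → 0 ≤ r) :
    ∀ (k : Nat) (i0 : Int) (a : PySem.Dict Int Int × List Int × Int × Int × Int)
      (b : Int × Int × Int),
      0 ≤ i0 → i0 + k = (text.length : Int) → relAB idx text i0 a b →
      relAB idx text (text.length : Int)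
        ((PySem.List.pyRange i0 (text.length : Int) 1).foldl (stepA idx text) a)
        ((PySem.List.pyRange i0 (text.length : Int) 1).foldl
          (fun st j => stepB idx text (idx.size : Int) st (j, PySem.List.pyGetD text j "")) b) := by
  intro k
  induction k with
  | zero =>
    intro i0 a b h0 hk hrel
    rw [PySem.List.pyRange_one_eq_nil (by omega)]
    simp only [List.foldl_nil]
    rw [show ((text.length : Int)) = i0 by omega]
    exact hrel
  | succ n ih =>
    intro i0 a b h0 hk hrel
    rw [PySem.List.pyRange_one_cons (by omega)]
    simp only [List.foldl_cons]
    exact ih (i0 + 1) _ _ (by omega) (by omega)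
      (step_rel idx text i0 a b hvals h0 (by omega) hrel)

lemma rel_init (idx : PySem.Dict String Int) (text : List String) :
    relAB idx text 0
      (PySem.Dict.empty, List.replicate text.length (-1 : Int), (text.length : Int), 0, 0)
      ((text.length : Int), 0, 0) := by
  refine ⟨List.length_replicate, rfl, ?_, ?_⟩
  · intro t
    rw [findBack_neg idx text t (by omega)]
    simp [PySem.Dict.get?_empty]
  · intro j r hj0 hji _
    omega

-- ===== VERDICT (by name: the statement is the Claim_ definition above) =====
theorem find_occurence_spec : Claim_equal_find_occurence := by
  intro words text _
  unfold Spec_find_occurence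
  show
    (let st :=
      (PySem.List.pyRange 0 (text.length : Int) 1).foldl
        (stepA ((PySem.List.pyRange 0 (words.length : Int) 1).foldl
          (fun d i => d.insert (PySem.List.pyGetD words i "") i) PySem.Dict.empty) text)
        (PySem.Dict.empty, List.replicate text.length (-1 : Int), (text.length : Int), 0, 0)
     PySem.List.slice text (some st.2.2.2.1) (some (st.2.2.2.2 + 1))) =
    (let rank : PySem.Dict String Int :=
      (PySem.List.enumerate words 0).foldl (fun d p => d.insert p.2 p.1) PySem.Dict.empty
     let st := (PySem.List.enumerate text 0).foldl (stepB rank text (rank.size : Int))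
        ((text.length : Int), 0, 0)
     PySem.List.slice text (some st.2.1) (some (st.2.2 + 1)))
  simp only [PySem.List.enumerate_eq_map_pyRange (d := ""), List.foldl_map, PySem.List.len_eq]
  set idx : PySem.Dict String Int :=
    (PySem.List.pyRange 0 (words.length : Int) 1).foldl
      (fun d i => d.insert (PySem.List.pyGetD words i "") i) PySem.Dict.empty with hidx
  have hvals : ∀ w r, idx.get? w = some r → 0 ≤ r := by
    rw [hidx]
    exact foldl_insert_values_nonneg (fun i => PySem.List.pyGetD words i "")
      (PySem.List.pyRange 0 (words.length : Int) 1) PySem.Dict.empty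
      (fun i hi => ((PySem.List.mem_pyRange_one).1 hi).1)
      (fun w r h => absurd h (by simp [PySem.Dict.get?_empty]))
  have hrel := loop_rel idx text hvals text.length 0
    (PySem.Dict.empty, List.replicate text.length (-1 : Int), (text.length : Int), 0, 0)
    ((text.length : Int), 0, 0) (le_refl 0) (by omega) (rel_init idx text)
  obtain ⟨-, htriple, -, -⟩ := hrel
  rw [show
    ((PySem.List.pyRange 0 (text.length : Int) 1).foldl (stepA idx text)
      (PySem.Dict.empty, List.replicate text.length (-1 : Int), (text.length : Int), 0, 0)).2.2 =
    ((PySem.List.pyRange 0 (text.length : Int) 1).foldl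
      (fun st j => stepB idx text (idx.size : Int) st (j, PySem.List.pyGetD text j ""))
      ((text.length : Int), 0, 0)) from htriple]
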